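-- pv_equiv track=rewrite | github.com/ffavela/mset | mset.py | mG
-- ===== SOURCE A (Python) =====
-- def tOp(xStr, LL):
--     return [[xStr] + e for e in LL]
--
-- def nL(L):
--     if L[0] == 1:
--         return L[1:]
--     return [L[0]-1]+L[1:]
--
-- def mG(M,k):
--     M.sort(key=len, reverse=True)
--     L=[len(m) for m in M]
--     N=sum(L)
--     S=[e for sublist in M for e in sublist]
--     def g(k,L,i=0):
--         if i > N-k:
--             return [ ]
--         if k == 0:
--             return [[ ]]
--         if i == N-k:
--             return tOp(S[i],g(k-1,nL(L),i+1))
--         return tOp(S[i],g(k-1,nL(L),i+1))+g(k,L[1:],i+L[0])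
--     return g(k,L)
-- ===== SOURCE B (Python) =====
-- def mG(M, k):
--     # same observable in-place sort as A
--     M.sort(key=len, reverse=True)
--     def h(gs, k):
--         if k > sum(len(g) for g in gs):
--             return []
--         if not gs:
--             return [[]] if k == 0 else []
--         g = gs[0]
--         return [g[:c] + rest
--                 for c in range(min(len(g), k), -1, -1)
--                 for rest in h(gs[1:], k - c)]
--     return h(M, k)
-- ===== Notes on version B (the rewrite author's own statement) =====
-- stated objective: alternative
-- what changed: A recurses take-one-element/skip-rest-of-group over the flattened multiset with a parallel length list; B recurses over the groups themselves, choosing a prefix length per group in descending order, which yields the same combinations in the same order.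
-- crash fix: For k < 0 A walks past the end of the flattened list and raises IndexError; B returns []. — e.g. on mG([[1]], -1): A raises IndexError, B returns []
import Mathlib
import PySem

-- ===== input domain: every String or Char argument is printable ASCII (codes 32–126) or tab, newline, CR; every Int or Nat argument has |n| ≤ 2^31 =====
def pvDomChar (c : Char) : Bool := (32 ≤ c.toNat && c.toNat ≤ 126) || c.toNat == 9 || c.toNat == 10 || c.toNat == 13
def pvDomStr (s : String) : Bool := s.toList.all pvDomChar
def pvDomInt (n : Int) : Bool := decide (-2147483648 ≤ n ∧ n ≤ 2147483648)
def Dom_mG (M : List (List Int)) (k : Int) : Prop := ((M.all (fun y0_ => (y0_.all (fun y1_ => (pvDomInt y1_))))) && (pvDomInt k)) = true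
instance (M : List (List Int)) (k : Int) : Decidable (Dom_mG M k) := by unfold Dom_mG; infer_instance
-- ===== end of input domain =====

-- B replaces A's take-one-element/skip-group recursion over the flattened multiset by a
-- choose-a-prefix-length-per-group recursion over the groups (objective: alternative).
-- Both A and B sort M in place (same observable mutation); the equivalence proved is about the return value.

-- ===== PORT A =====
def tOp (xStr : Int) (LL : List (List Int)) : List (List Int) :=
  LL.map (fun e => xStr :: e)

def nL (L : List Int) : List Int :=
  if (PySem.List.pyGet? L 0).getD 0 = 1 then PySem.List.slice L (some 1) none
  else ((PySem.List.pyGet? L 0).getD 0 - 1) :: PySem.List.slice L (some 1) none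
  -- L[0] on empty L raises IndexError in Python (unreachable when 0 ≤ k); getD 0 is junk there

-- the inner function g(k, L, i); fuel only makes the same recursion total (unreachable 0 case)
def gA (S : List Int) (N : Int) : Nat → Int → List Int → Int → List (List Int)
  | 0, _, _, _ => []
  | fuel+1, k, L, i =>
    if i > N - k then []
    else if k = 0 then [[]]
    else if i = N - k then
      tOp ((PySem.List.pyGet? S i).getD 0) (gA S N fuel (k-1) (nL L) (i+1))
    else
      tOp ((PySem.List.pyGet? S i).getD 0) (gA S N fuel (k-1) (nL L) (i+1))
        ++ gA S N fuel k (PySem.List.slice L (some 1) none) (i + (PySem.List.pyGet? L 0).getD 0)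
  -- S[i] raises IndexError in Python exactly when k < 0 (outside Pre_); getD 0 is junk there

def mG (M : List (List Int)) (k : Int) : List (List Int) :=
  let Ms := PySem.List.sorted M (fun m => (m.length : Int)) true
  let L := Ms.map (fun m => (m.length : Int))
  let N := L.sum
  let S := Ms.flatMap (fun m => m)
  gA S N (S.length + L.length + 1) k L 0

-- ===== PORT B =====
def hB : List (List Int) → Int → List (List Int)
  | [], k =>
    if ((([] : List (List Int)).map (fun g => (g.length : Int))).sum) < k then []
    else if k = 0 then [[]] else []
  | g :: rest, k =>
    if (((g :: rest).map (fun g => (g.length : Int))).sum) < k then []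
    else
      (PySem.List.pyRange (min (g.length : Int) k) (-1) (-1)).flatMap
        (fun c => (hB rest (k - c)).map (fun r => PySem.List.slice g none (some c) ++ r))

def mG_alt (M : List (List Int)) (k : Int) : List (List Int) :=
  hB (PySem.List.sorted M (fun m => (m.length : Int)) true) k

-- ===== PRECONDITION & SPEC =====
-- Pre_ excludes exactly the inputs where A raises IndexError (any negative k).
def Pre_mG (M : List (List Int)) (k : Int) : Prop := 0 ≤ k
instance (M : List (List Int)) (k : Int) : Decidable (Pre_mG M k) := by unfold Pre_mG; infer_instance
def pvWitness_mG : List (List Int) × Int := ([[1, 2], [3]], 2)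

-- For k < 0 Python A raises IndexError (it walks past the end of the flattened list); B returns [].
def Raises_mG (M : List (List Int)) (k : Int) : Prop := k < 0
instance (M : List (List Int)) (k : Int) : Decidable (Raises_mG M k) := by unfold Raises_mG; infer_instance
def pvRaiseWitness_mG : List (List Int) × Int := ([[1]], -1)
def pvRaiseWitnessOut_mG : List (List Int) := []

def Spec_mG (M : List (List Int)) (k : Int) (out : List (List Int)) : Prop := out = mG_alt M k
instance (M : List (List Int)) (k : Int) (out : List (List Int)) : Decidable (Spec_mG M k out) := by unfold Spec_mG; infer_instance

-- ===== CLAIM (what is proved, stated in full; the proofs are below) =====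
def Claim_equal_mG : Prop := ∀ (M : List (List Int)) (k : Int), Dom_mG M k → Pre_mG M k → Spec_mG M k (mG M k)
def Claim_raises_mG : Prop := (∀ (M : List (List Int)) (k : Int), Dom_mG M k → Raises_mG M k → ¬ Pre_mG M k) ∧ (Dom_mG (pvRaiseWitness_mG.1) (pvRaiseWitness_mG.2) ∧ Raises_mG (pvRaiseWitness_mG.1) (pvRaiseWitness_mG.2) ∧ mG_alt (pvRaiseWitness_mG.1) (pvRaiseWitness_mG.2) = pvRaiseWitnessOut_mG)

-- ===== LEMMAS AND PROOFS =====

lemma sum_lengths (gs : List (List Int)) :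
    (gs.map (fun g => (g.length : Int))).sum = ((gs.flatMap (fun m => m)).length : Int) := by
  induction gs with
  | nil => simp
  | cons g gs ih => simp [ih]

lemma hB_gt (gs : List (List Int)) (k : Int) :
    ((gs.flatMap (fun m => m)).length : Int) < k → hB gs k = [] := by
  intro h
  match gs with
  | [] =>
    rw [hB, if_pos (by simpa using h)]
  | g :: rest =>
    rw [hB, if_pos (by rw [sum_lengths]; exact h)]

lemma hB_cons_eq (g : List Int) (rest : List (List Int)) (k : Int) (hk : 0 ≤ k) :
    hB (g :: rest) k
      = (PySem.List.pyRange (min ((g.length : Int)) k) (-1) (-1)).flatMap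
          (fun c => (hB rest (k - c)).map (fun r => PySem.List.slice g none (some c) ++ r)) := by
  rw [hB]
  by_cases hguard : (((g :: rest).map (fun g => (g.length : Int))).sum) < k
  · rw [if_pos hguard]
    symm
    rw [List.flatMap_eq_nil_iff]
    intro c hc
    rw [PySem.List.mem_pyRange_neg_one] at hc
    have hs1 := sum_lengths (g :: rest)
    have hs2 : (List.flatMap (fun m => m) (g :: rest)).length
        = g.length + (List.flatMap (fun m => m) rest).length := by simp
    have : hB rest (k - c) = [] := by
      apply hB_gt
      simp at hc
      omega
    simp [this]
  · rw [if_neg hguard]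

lemma hB_zero (gs : List (List Int)) : hB gs 0 = [[]] := by
  induction gs with
  | nil => rw [hB]; simp
  | cons g gs ih =>
    have hmin : min ((g.length : Int)) 0 = 0 := by omega
    rw [hB_cons_eq g gs 0 le_rfl, hmin, PySem.List.pyRange_neg_one_cons (by omega),
      PySem.List.pyRange_neg_one_eq_nil (by omega)]
    simp [ih, PySem.List.slice_to]

lemma hB_nil_cons (gs : List (List Int)) (k : Int) (hk : 0 ≤ k) :
    hB ([] :: gs) k = hB gs k := by
  have hmin : min (([] : List Int).length : Int) k = 0 := by simp; omega
  rw [hB_cons_eq [] gs k hk, hmin, PySem.List.pyRange_neg_one_cons (by omega),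
    PySem.List.pyRange_neg_one_eq_nil (by omega)]
  simp [PySem.List.slice_to]

lemma desc_split (n : Nat) :
    PySem.List.pyRange (n : Int) (-1) (-1) = PySem.List.pyRange (n : Int) 0 (-1) ++ [0] := by
  induction n with
  | zero =>
    rw [PySem.List.pyRange_neg_one_cons (by omega)]
    rw [PySem.List.pyRange_neg_one_eq_nil (by omega), PySem.List.pyRange_neg_one_eq_nil (by omega)]
    rfl
  | succ n ih =>
    rw [PySem.List.pyRange_neg_one_cons (a := ((n+1 : Nat) : Int)) (by push_cast; omega)]
    rw [PySem.List.pyRange_neg_one_cons (a := ((n+1 : Nat) : Int)) (b := 0) (by push_cast; omega)]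
    have h1 : ((n+1 : Nat) : Int) - 1 = (n : Int) := by push_cast; omega
    rw [h1, ih]
    rfl

lemma desc_shift (n : Nat) :
    PySem.List.pyRange ((n : Int) + 1) 0 (-1) = (PySem.List.pyRange (n : Int) (-1) (-1)).map (· + 1) := by
  induction n with
  | zero =>
    rw [PySem.List.pyRange_neg_one_cons (b := 0) (by omega), PySem.List.pyRange_neg_one_eq_nil (by omega)]
    rw [PySem.List.pyRange_neg_one_cons (by omega), PySem.List.pyRange_neg_one_eq_nil (by omega)]
    rfl
  | succ n ih =>
    rw [PySem.List.pyRange_neg_one_cons (b := 0) (by push_cast; omega)]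
    rw [PySem.List.pyRange_neg_one_cons (a := ((n+1 : Nat) : Int)) (by push_cast; omega)]
    have h1 : ((n+1 : Nat) : Int) + 1 - 1 = (n : Int) + 1 := by push_cast; omega
    have h2 : ((n+1 : Nat) : Int) - 1 = (n : Int) := by push_cast; omega
    rw [h1, h2, ih]
    simp

lemma hB_take_skip (x : Int) (g' : List Int) (rest : List (List Int)) (k : Int) (hk : 1 ≤ k) :
    hB ((x :: g') :: rest) k
      = (hB (g' :: rest) (k - 1)).map (fun r => x :: r) ++ hB rest k := by
  obtain ⟨mn, hmn⟩ : ∃ mn : Nat, min (((x :: g').length : Int)) k = (mn : Int) + 1 :=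
    ⟨(min (((x :: g').length : Int)) k - 1).toNat, by simp; omega⟩
  have hm' : min ((g'.length : Int)) (k - 1) = (mn : Int) := by
    simp at hmn ⊢; omega
  have hds := desc_split (mn + 1)
  push_cast at hds
  rw [hB_cons_eq (x :: g') rest k (by omega), hB_cons_eq g' rest (k - 1) (by omega), hm', hmn, hds]
  rw [List.flatMap_append, desc_shift mn, List.flatMap_map, List.map_flatMap]
  congr 1
  · apply List.flatMap_congr
    intro c hc
    rw [PySem.List.mem_pyRange_neg_one] at hc
    have hc0 : 0 ≤ c := by omega
    have h1 : k - (c + 1) = k - 1 - c := by ring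
    have h2 : PySem.List.slice (x :: g') none (some (c + 1)) = x :: PySem.List.slice g' none (some c) := by
      rw [show c = ((c.toNat : Nat) : Int) from by omega]
      rw [show ((c.toNat : Nat) : Int) + 1 = (((c.toNat + 1 : Nat)) : Int) from by push_cast; ring]
      rw [PySem.List.slice_to_natCast, PySem.List.slice_to_natCast, List.take_succ_cons]
    rw [h1, h2]
    simp [Function.comp_def]
  · simp [PySem.List.slice_to]

def InvG : List (List Int) → Prop
  | [] => True
  | g :: rest => (rest.map List.length).Pairwise (fun a b => b ≤ a) ∧ (g.length = 0 → ∀ h ∈ rest, h.length = 0)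

lemma InvG_tail (g : List Int) (rest : List (List Int)) (h : InvG (g :: rest)) : InvG rest := by
  obtain ⟨hp, _⟩ := h
  cases rest with
  | nil => trivial
  | cons h t =>
    simp only [List.map_cons, List.pairwise_cons] at hp
    exact ⟨hp.2, fun hz u hu => by
      have := hp.1 u.length (List.mem_map_of_mem hu)
      omega⟩

lemma InvG_of_pairwise (gs : List (List Int))
    (h : (gs.map List.length).Pairwise (fun a b => b ≤ a)) : InvG gs := by
  cases gs with
  | nil => trivial
  | cons g rest =>
    simp only [List.map_cons, List.pairwise_cons] at h
    exact ⟨h.2, fun hz u hu => by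
      have := h.1 u.length (List.mem_map_of_mem hu)
      omega⟩

lemma flat_nil_of_all_nil (rest : List (List Int)) (h : ∀ u ∈ rest, u.length = 0) :
    rest.flatMap (fun m => m) = [] := by
  rw [List.flatMap_eq_nil_iff]
  intro u hu
  exact List.eq_nil_of_length_eq_zero (h u hu)

lemma gA_eq_hB (fuel : Nat) :
    ∀ (gs : List (List Int)) (k : Int) (pre S : List Int),
    S = pre ++ gs.flatMap (fun m => m) →
    0 ≤ k → InvG gs →
    (gs.flatMap (fun m => m)).length + gs.length + 1 ≤ fuel →
    gA S (S.length : Int) fuel k (gs.map (fun g => (g.length : Int))) (pre.length : Int) = hB gs k := by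
  induction fuel with
  | zero => intro gs k pre S _ _ _ hf; omega
  | succ f ih =>
    intro gs k pre S hS hk hInv hf
    have hlen : S.length = pre.length + (gs.flatMap (fun m => m)).length := by
      rw [hS]; simp
    rw [gA]
    by_cases h1 : (pre.length : Int) > (S.length : Int) - k
    · rw [if_pos h1, hB_gt gs k (by omega)]
    rw [if_neg h1]
    by_cases h2 : k = 0
    · rw [if_pos h2, h2, hB_zero]
    rw [if_neg h2]
    have hk1 : 1 ≤ k := by omega
    have hn1 : 1 ≤ (gs.flatMap (fun m => m)).length := by
      by_contra hc
      have : (gs.flatMap (fun m => m)).length = 0 := by omega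
      omega
    -- gs is nonempty and its first group is nonempty
    obtain ⟨g, rest, rfl⟩ : ∃ g rest, gs = g :: rest := by
      cases gs with
      | nil => simp at hn1
      | cons a b => exact ⟨a, b, rfl⟩
    obtain ⟨x, g', rfl⟩ : ∃ x g', g = x :: g' := by
      cases g with
      | nil =>
        exfalso
        have hall := hInv.2 (by simp)
        have := flat_nil_of_all_nil rest hall
        simp [this] at hn1
      | cons a b => exact ⟨a, b, rfl⟩
    -- S[i] = x
    have hget : (PySem.List.pyGet? S (pre.length : Int)).getD 0 = x := by
      rw [hS]
      rw [PySem.List.pyGet?_natCast]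
      simp
    -- head of L and tail of L
    have hL0 : (PySem.List.pyGet? (((x :: g') :: rest).map (fun g => (g.length : Int))) 0).getD 0
        = ((x :: g').length : Int) := by
      rw [show (0 : Int) = ((0 : Nat) : Int) from rfl, PySem.List.pyGet?_natCast]
      simp
    have hLtail : PySem.List.slice (((x :: g') :: rest).map (fun g => (g.length : Int))) (some 1) none
        = rest.map (fun g => (g.length : Int)) := by
      rw [PySem.List.slice_from_one]; rfl
    -- the take recursion equals hB (g' :: rest) (k-1) via IH
    have htake : gA S (S.length : Int) f (k - 1)
        (nL (((x :: g') :: rest).map (fun g => (g.length : Int)))) ((pre.length : Int) + 1)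
        = hB (g' :: rest) (k - 1) := by
      have hpre1 : ((pre ++ [x]).length : Int) = (pre.length : Int) + 1 := by simp
      by_cases hg' : g' = []
      · subst hg'
        have hnL : nL (((x :: []) :: rest).map (fun g => (g.length : Int)))
            = rest.map (fun g => (g.length : Int)) := by
          unfold nL
          rw [show (0 : Int) = ((0 : Nat) : Int) from rfl, PySem.List.pyGet?_natCast,
            PySem.List.slice_from_one]
          simp
        rw [hnL, ← hpre1, ih rest (k - 1) (pre ++ [x]) S (by rw [hS]; simp) (by omega)
          (InvG_tail _ _ hInv) (by simp only [List.flatMap_cons, List.length_append, List.length_cons] at hf ⊢; omega)]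
        rw [hB_nil_cons rest (k - 1) (by omega)]
      · have hnL : nL (((x :: g') :: rest).map (fun g => (g.length : Int)))
            = (g' :: rest).map (fun g => (g.length : Int)) := by
          have hne : (((x :: g').length : Int)) ≠ 1 := by
            simpa using hg'
          simp only [nL, hL0, hLtail, if_neg hne]
          simp
        rw [hnL, ← hpre1, ih (g' :: rest) (k - 1) (pre ++ [x]) S (by rw [hS]; simp) (by omega)
          ⟨hInv.1, fun hz => absurd (List.eq_nil_of_length_eq_zero hz) hg'⟩
          (by simp only [List.flatMap_cons, List.length_append, List.length_cons] at hf ⊢; omega)]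
    by_cases h3 : (pre.length : Int) = (S.length : Int) - k
    · rw [if_pos h3, hget, htake, tOp, hB_take_skip x g' rest k hk1]
      have hrest : hB rest k = [] := by
        apply hB_gt
        simp only [List.flatMap_cons, List.length_append, List.length_cons] at hlen
        omega
      rw [hrest, List.append_nil]
    · rw [if_neg h3, hget, htake, tOp, hL0, hLtail]
      have hskip : gA S (S.length : Int) f k (rest.map (fun g => (g.length : Int)))
          ((pre.length : Int) + ((x :: g').length : Int)) = hB rest k := by
        have hpg : ((pre ++ (x :: g')).length : Int) = (pre.length : Int) + ((x :: g').length : Int) := by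
          simp
        rw [← hpg, ih rest k (pre ++ (x :: g')) S (by rw [hS]; simp) hk
          (InvG_tail _ _ hInv) (by simp only [List.flatMap_cons, List.length_append, List.length_cons] at hf ⊢; omega)]
      rw [hskip, hB_take_skip x g' rest k hk1]

-- ===== VERDICT (by name: the statement is the Claim_ definition above) =====
theorem mG_spec : Claim_equal_mG := by
  intro M k _ hPre
  unfold Spec_mG mG mG_alt
  have hsum := sum_lengths (PySem.List.sorted M (fun m => (m.length : Int)) true)
  simp only
  rw [hsum]
  have hlen : ((PySem.List.sorted M (fun m => (m.length : Int)) true).map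
      (fun m => (m.length : Int))).length
      = (PySem.List.sorted M (fun m => (m.length : Int)) true).length := by simp
  have h0 : (0 : Int) = (([] : List Int).length : Int) := by simp
  rw [h0]
  apply gA_eq_hB
  · simp
  · exact hPre
  · apply InvG_of_pairwise
    rw [List.pairwise_map]
    have := PySem.List.sorted_pairwise_rev M (fun m => (m.length : Int))
    exact this.imp (by intro a b h; exact_mod_cast h)
  · simp

theorem mG_raises : Claim_raises_mG := by
  unfold Claim_raises_mG
  constructor
  · intro M k _ hR hP
    unfold Raises_mG at hR
    unfold Pre_mG at hP
    omega
  · exact ⟨by decide, by decide, by decide⟩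

-- self-check: at the raise witness the excluded region is really outside Pre_
theorem pvRaisesOutsidePre_ok : ¬ Pre_mG pvRaiseWitness_mG.1 pvRaiseWitness_mG.2 :=
  mG_raises.1 pvRaiseWitness_mG.1 pvRaiseWitness_mG.2 (by decide) mG_raises.2.2.1
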